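-- pv_equiv track=rewrite | github.com/Timophey999/Tests_for_Performance_Lab | task1/task1.py | circular_array_path
-- ===== SOURCE A (Python) =====
-- from itertools import cycle
--
-- def circular_array_path(n_arg: int, m_arg: int) -> str:
--     """Формирует путь по круговому массиву на основе параметров n и m.
--
--     Args:
--         n_arg (int): Количество элементов в массиве.
--         m_arg (int): Длина шага для обхода массива.
--
--     Returns:
--         str: Строка, представляющая путь по начальным элементам интервалов.
--     """
--     m_counter = 1  # Счетчик для отслеживания текущего шага
--     answer = ''  # Переменная для хранения результата
--
--     # Создаем круговой массив из чисел от 1 до n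
--     n_range = cycle(range(1, n_arg + 1))
--
--     # Итерируемся по круговому массиву
--     for index, elem in enumerate(n_range, 1):
--         if index == 1:
--             answer = str(elem)  # Добавляем первый элемент в ответ
--         if index <= n_arg * m_arg:
--             if m_counter == m_arg:
--                 m_counter = 1  # Сбрасываем счетчик после достижения m шагов
--                 if str(elem) not in answer:
--                     answer += str(elem)  # Добавляем элемент в ответ, если он еще не был добавлен
--                 else:
--                     break  # Прекращаем цикл, если элемент уже был добавлен (замыкание на первый элемент)
--             m_counter += 1  # Увеличиваем счетчик шагов
--         else:
--             break  # Прекращаем цикл, если достигли максимально возможного числа шагов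
--     return answer  # Возвращаем сформированный путь
-- ===== SOURCE B (Python) =====
-- def circular_array_path(n_arg: int, m_arg: int) -> str:
--     """Path over circular array 1..n stepping m: picks computed by modular
--     arithmetic instead of simulating every single step of the cycle."""
--     if n_arg < 1:
--         return ''
--     if m_arg <= 1:
--         return '1'
--     answer = '1'
--     # A's k-th pick lands at index k*(m-1)+1; the index cap n*m admits
--     # exactly k in 1..(n*m-1)//(m-1).
--     last_k = (n_arg * m_arg - 1) // (m_arg - 1)
--     for k in range(1, last_k + 1):
--         s = str((k * (m_arg - 1)) % n_arg + 1)
--         if s in answer: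
--             break
--         answer += s
--     return answer
-- ===== Notes on version B (the rewrite author's own statement) =====
-- stated objective: faster
-- what changed: Instead of simulating every step of the infinite cycle with a step counter, B computes each picked element directly as (k*(m-1)) % n + 1 and iterates only over the picks, whose count (n*m-1)//(m-1) is derived in closed form from A's index cap.
import Mathlib
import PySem

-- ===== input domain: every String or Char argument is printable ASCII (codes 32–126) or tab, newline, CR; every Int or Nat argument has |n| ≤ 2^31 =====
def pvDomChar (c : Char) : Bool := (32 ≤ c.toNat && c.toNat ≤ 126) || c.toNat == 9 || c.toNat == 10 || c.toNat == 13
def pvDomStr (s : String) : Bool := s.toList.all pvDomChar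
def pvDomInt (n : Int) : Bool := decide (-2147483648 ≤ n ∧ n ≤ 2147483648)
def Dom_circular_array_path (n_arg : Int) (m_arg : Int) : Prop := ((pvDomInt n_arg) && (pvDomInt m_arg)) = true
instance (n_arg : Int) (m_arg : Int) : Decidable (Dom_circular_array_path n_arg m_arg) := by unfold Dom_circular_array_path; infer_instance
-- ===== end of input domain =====

-- B replaces A's step-by-step simulation of the cycle by computing each picked
-- element directly as (k*(m-1)) % n + 1, iterating only over the picks (objective: faster).

-- ===== PORT A =====
-- A's `for index, elem in enumerate(cycle(range(1, n+1)), 1)` loop; the loop only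
-- recurses while index ≤ n*m, so (n*m + 1 - index).toNat is a measure (no fuel needed).
-- elem = ((index-1) mod n) + 1 is exactly the element cycle yields at that index (n ≥ 1,
-- guaranteed by the caller: for n < 1 the cycle is empty and the loop body never runs).
def circularAux (n_arg m_arg : Int) (index m_counter : Int) (answer : String) : String :=
  let elem : Int := PySem.Int.mod (index - 1) n_arg + 1
  let ans1 : String := if index = 1 then PySem.Int.toStr elem else answer
  if index ≤ n_arg * m_arg then
    if m_counter = m_arg then
      if PySem.Str.isIn (PySem.Int.toStr elem) ans1 = false then
        circularAux n_arg m_arg (index + 1) 2 (ans1 ++ PySem.Int.toStr elem)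
      else ans1
    else circularAux n_arg m_arg (index + 1) (m_counter + 1) ans1
  else ans1
termination_by (n_arg * m_arg + 1 - index).toNat
decreasing_by all_goals omega

def circular_array_path (n_arg : Int) (m_arg : Int) : String :=
  if n_arg < 1 then "" else circularAux n_arg m_arg 1 1 ""

-- ===== PORT B =====
-- B's `for k in range(1, last_k + 1)` loop with early break: structural recursion on
-- the number of remaining k values.
def altAux (n_arg m_arg : Int) : Nat → Int → String → String
  | 0, _, answer => answer
  | cnt + 1, k, answer =>
    let s : String := PySem.Int.toStr (PySem.Int.mod (k * (m_arg - 1)) n_arg + 1)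
    if PySem.Str.isIn s answer = true then answer
    else altAux n_arg m_arg cnt (k + 1) (answer ++ s)

def circular_array_path_alt (n_arg : Int) (m_arg : Int) : String :=
  if n_arg < 1 then "" else
  if m_arg ≤ 1 then "1" else
  let last_k : Int := PySem.Int.floordiv (n_arg * m_arg - 1) (m_arg - 1)
  altAux n_arg m_arg last_k.toNat 1 "1"

-- ===== PRECONDITION & SPEC =====
def Spec_circular_array_path (n_arg : Int) (m_arg : Int) (out : String) : Prop := out = circular_array_path_alt n_arg m_arg
instance (n_arg : Int) (m_arg : Int) (out : String) : Decidable (Spec_circular_array_path n_arg m_arg out) := by unfold Spec_circular_array_path; infer_instance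

-- ===== CLAIM (what is proved, stated in full; the proofs are below) =====
def Claim_equal_circular_array_path : Prop := ∀ (n_arg : Int) (m_arg : Int), Dom_circular_array_path n_arg m_arg → Spec_circular_array_path n_arg m_arg (circular_array_path n_arg m_arg)

-- ===== LEMMAS AND PROOFS =====

-- Running A's loop from a state between two picks (index i, counter c = m - j with the
-- next pick at index p = i + j) either reaches the pick at p and behaves like one B step,
-- or breaks (returns the answer unchanged) because an index exceeded n*m — in which case
-- p > n*m as well.
theorem circularAux_run_to_pick (n m : Int) (j : Nat) :
    ∀ (i : Int) (ans : String), i ≥ 2 →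
    circularAux n m i (m - j) ans =
      (if i + (j : Int) ≤ n * m then
        (if PySem.Str.isIn (PySem.Int.toStr (PySem.Int.mod (i + (j : Int) - 1) n + 1)) ans = false
         then circularAux n m (i + (j : Int) + 1) 2
                (ans ++ PySem.Int.toStr (PySem.Int.mod (i + (j : Int) - 1) n + 1))
         else ans)
      else ans) := by
  induction j with
  | zero =>
    intro i ans hi
    rw [circularAux]
    simp only [Int.natCast_zero, add_zero, sub_zero]
    have h1 : ¬ (i = 1) := by omega
    by_cases hle : i ≤ n * m
    · simp [h1, hle]
    · simp [h1, hle]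
  | succ j ih =>
    intro i ans hi
    rw [circularAux]
    have h1 : ¬ (i = 1) := by omega
    by_cases hle : i ≤ n * m
    · have hc : ¬ (m - ((j : Int) + 1) = m) := by omega
      simp only [h1, if_false, hle, if_true, Int.natCast_add, Int.natCast_one, hc]
      have hstep : m - ((j : Int) + 1) + 1 = m - (j : Int) := by ring
      rw [hstep, ih (i + 1) ans (by omega)]
      have harr : i + 1 + (j : Int) = i + ((j : Int) + 1) := by ring
      simp only [harr]
    · have hp : ¬ (i + ((j : Int) + 1) ≤ n * m) := by omega
      simp [h1, hle, hp]

-- Main correspondence: from the state just after pick k-1 (index (k-1)*(m-1)+2,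
-- counter 2), A's loop computes exactly B's loop over the remaining cnt picks.
theorem circularAux_eq_altAux (n m : Int) (hm : 2 ≤ m)
    (K : Int) (hK : K = PySem.Int.floordiv (n * m - 1) (m - 1)) :
    ∀ (cnt : Nat) (k : Int) (ans : String), 1 ≤ k → cnt = (K + 1 - k).toNat →
      circularAux n m ((k - 1) * (m - 1) + 2) 2 ans = altAux n m cnt k ans := by
  -- floor-division bracket for K, used in both cases
  have hKb : K * (m - 1) ≤ n * m - 1 ∧ n * m - 1 < (K + 1) * (m - 1) := by
    have h := PySem.Int.floordiv_mul_add_mod (n * m - 1) (m - 1)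
    have h0 : 0 ≤ PySem.Int.mod (n * m - 1) (m - 1) :=
      PySem.Int.mod_nonneg _ (by omega)
    have h1 : PySem.Int.mod (n * m - 1) (m - 1) < m - 1 :=
      PySem.Int.mod_lt _ (by omega)
    constructor <;> nlinarith [h, h0, h1, hK]
  intro cnt
  induction cnt with
  | zero =>
    intro k ans hk hcnt
    have hrun := circularAux_run_to_pick n m (m - 2).toNat ((k - 1) * (m - 1) + 2) ans
      (by nlinarith)
    have hc2 : m - ((m - 2).toNat : Int) = 2 := by omega
    have hj : (k - 1) * (m - 1) + 2 + ((m - 2).toNat : Int) = k * (m - 1) + 1 := by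
      have h2 : ((m - 2).toNat : Int) = m - 2 := by omega
      rw [h2]; ring
    rw [hc2, hj] at hrun
    rw [hrun]
    have hgt : ¬ (k * (m - 1) + 1 ≤ n * m) := by
      have hkK : K + 1 ≤ k := by omega
      nlinarith
    rw [if_neg hgt, altAux]
  | succ cnt ih =>
    intro k ans hk hcnt
    have hkK : k ≤ K := by omega
    have hrun := circularAux_run_to_pick n m (m - 2).toNat ((k - 1) * (m - 1) + 2) ans
      (by nlinarith)
    have hc2 : m - ((m - 2).toNat : Int) = 2 := by omega
    have hj : (k - 1) * (m - 1) + 2 + ((m - 2).toNat : Int) = k * (m - 1) + 1 := by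
      have h2 : ((m - 2).toNat : Int) = m - 2 := by omega
      rw [h2]; ring
    rw [hc2, hj] at hrun
    rw [hrun]
    rw [show k * (m - 1) + 1 - 1 = k * (m - 1) from by ring]
    have hle : k * (m - 1) + 1 ≤ n * m := by nlinarith
    rw [if_pos hle]
    conv_rhs => rw [altAux]
    set s := PySem.Int.toStr (PySem.Int.mod (k * (m - 1)) n + 1) with hsdef
    by_cases hin : PySem.Str.isIn s ans = true
    · rw [if_neg (by simp only [hin]; simp), if_pos hin]
    · have hf : PySem.Str.isIn s ans = false := by
        cases h : PySem.Str.isIn s ans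
        · rfl
        · exact absurd h hin
      rw [if_pos hf, if_neg hin]
      rw [show k * (m - 1) + 1 + 1 = ((k + 1) - 1) * (m - 1) + 2 from by ring]
      exact ih (k + 1) (ans ++ s) (by omega) (by omega)

-- ===== VERDICT (by name: the statement is the Claim_ definition above) =====
theorem circular_array_path_spec : Claim_equal_circular_array_path := by
  intro n m _
  unfold Spec_circular_array_path circular_array_path circular_array_path_alt
  by_cases hn : n < 1
  · simp [hn]
  · simp only [hn, if_false]
    push_neg at hn
    have helem : PySem.Int.mod (1 - 1) n + 1 = 1 := by simp [PySem.Int.mod]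
    by_cases hm1 : m ≤ 1
    · -- m ≤ 1: A's loop stops on its first iteration and returns "1"
      simp only [hm1, if_true]
      rw [circularAux]
      by_cases hm0 : m ≤ 0
      · have hnm : ¬ ((1 : Int) ≤ n * m) := by nlinarith
        simp only [helem, hnm, if_false]
        decide
      · have hm : m = 1 := by omega
        subst hm
        have h1 : (1 : Int) ≤ n * 1 := by omega
        simp only [helem, h1, if_true]
        have hin : PySem.Str.isIn (PySem.Int.toStr 1) (PySem.Int.toStr 1) = true := by decide
        simp only [hin]
        rw [if_neg (by simp)]
        decide
    · -- m ≥ 2: one initial step of A's loop, then the pick correspondence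
      simp only [hm1, if_false]
      push_neg at hm1
      rw [circularAux]
      have h1 : (1 : Int) ≤ n * m := by nlinarith
      have hc : ¬ ((1 : Int) = m) := by omega
      simp only [helem, h1, if_true, hc, if_false]
      have h1s : PySem.Int.toStr 1 = "1" := by decide
      have hmain := circularAux_eq_altAux n m (by omega)
        (PySem.Int.floordiv (n * m - 1) (m - 1)) rfl
        (PySem.Int.floordiv (n * m - 1) (m - 1)).toNat 1 "1" (by omega) (by omega)
      have h2 : ((1 : Int) - 1) * (m - 1) + 2 = 1 + 1 := by ring
      rw [h2] at hmain
      rw [h1s]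
      rw [show ((1 : Int) + 1) = 2 from by norm_num] at hmain ⊢
      exact hmain
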